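-- pv_equiv track=rewrite | github.com/awmc000/socket-demos | stream/python/hangmanServer.py | getGraphic
-- ===== SOURCE A (Python) =====
-- EASY_MODE = True
--
-- def getGraphic(guesses_remaining):
--     # ASCII art
--     # Decided to use 'O' instead of '☺ ' - it seems to be two chars wide, awkward
--     full = '''
--  ┌─═══╗
--  O    ║
-- /|\   ║
-- / \   ║
-- ╦╦╦╦╦╦╢
-- '''
--
--     # strokes[0] is the last stroke of the man to draw
--     strokes = [
--         # note that each line of the full graphic is 7 chars followed by a newline
--         19,  # right arm
--         17,  # left arm
--         27,  # right leg
--         25,  # left leg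
--         18,  # torso
--         10  # head
--     ]
--
--     if EASY_MODE:
--         # give man hands and feet
--         full = '''
--   ┌─══╗
--   O   ║
-- _/|\_ ║
-- _/ \_ ║
-- ╦╦╦╦╦╦╢
-- '''
--         strokes = [
--             # note that each line of the full graphic is 7 chars followed by a newline
--             21,  # right hand
--             17,  # left hand
--             29,  # right foot
--             25,  # left foot
--             20,  # right arm
--             18,  # left arm
--             28,  # right leg
--             26,  # left leg
--             19,  # torso
--             11  # head
--         ]
--
--     # erase the strokes that haven't been drawn yet
--     partial = full
--     for stroke in strokes[:guesses_remaining]: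
--         partial = partial[:stroke] + ' ' + partial[stroke + 1:]
--
--     return partial
-- ===== SOURCE B (Python) =====
-- EASY_MODE = True
--
-- def getGraphic(guesses_remaining):
--     full = '''
--  ┌─═══╗
--  O    ║
-- /|\   ║
-- / \   ║
-- ╦╦╦╦╦╦╢
-- '''
--     strokes = [19, 17, 27, 25, 18, 10]
--
--     if EASY_MODE:
--         full = '''
--   ┌─══╗
--   O   ║
-- _/|\_ ║
-- _/ \_ ║
-- ╦╦╦╦╦╦╢
-- '''
--         strokes = [21, 17, 29, 25, 20, 18, 28, 26, 19, 11]
--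
--     # one pass: blank every position among the not-yet-drawn strokes
--     erase = set(strokes[:guesses_remaining])
--     return ''.join(' ' if i in erase else ch for i, ch in enumerate(full))
-- ===== Notes on version B (the rewrite author's own statement) =====
-- stated objective: idiomatic
-- what changed: A erases strokes by repeatedly splicing the string (slice + ' ' + slice, one full rebuild per stroke); B computes the erase set from strokes[:guesses_remaining] once and builds the result in a single enumerate pass over the full art, blanking exactly the indices in that set.
import Mathlib
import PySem

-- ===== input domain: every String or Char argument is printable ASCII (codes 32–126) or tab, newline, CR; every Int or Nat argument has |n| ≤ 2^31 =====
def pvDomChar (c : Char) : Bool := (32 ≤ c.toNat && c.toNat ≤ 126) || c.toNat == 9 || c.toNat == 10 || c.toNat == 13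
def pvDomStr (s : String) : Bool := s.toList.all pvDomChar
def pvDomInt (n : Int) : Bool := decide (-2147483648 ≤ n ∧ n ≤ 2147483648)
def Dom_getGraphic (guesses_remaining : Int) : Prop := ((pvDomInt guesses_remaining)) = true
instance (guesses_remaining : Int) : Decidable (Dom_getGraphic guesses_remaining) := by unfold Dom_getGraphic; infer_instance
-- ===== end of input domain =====

-- B replaces A's repeated slice-splices (one string rebuild per erased stroke) by one
-- enumerate pass over the full art testing membership in the erase set (objective: idiomatic).

-- ===== PORT A =====
-- A's easy-mode art and stroke positions (EASY_MODE is True, so the second assignments win)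
def gaFull : List Char := "\n  ┌─══╗\n  O   ║\n_/|\\_ ║\n_/ \\_ ║\n╦╦╦╦╦╦╢\n".toList
def gaStrokes : List Int := [21, 17, 29, 25, 20, 18, 28, 26, 19, 11]

def getGraphic (guesses_remaining : Int) : String :=
  String.ofList <|
    (PySem.List.slice gaStrokes none (some guesses_remaining)).foldl
      (fun part stroke =>
        PySem.List.slice part none (some stroke) ++ [' ']
          ++ PySem.List.slice part (some (stroke + 1)) none)
      gaFull

-- ===== PORT B =====
def gbFull : List Char := "\n  ┌─══╗\n  O   ║\n_/|\\_ ║\n_/ \\_ ║\n╦╦╦╦╦╦╢\n".toList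
def gbStrokes : List Int := [21, 17, 29, 25, 20, 18, 28, 26, 19, 11]

def getGraphic_alt (guesses_remaining : Int) : String :=
  let erase : PySem.Set Int :=
    PySem.Set.ofList (PySem.List.slice gbStrokes none (some guesses_remaining))
  String.ofList <|
    (PySem.List.enumerate gbFull 0).map
      (fun p => if PySem.Set.contains erase p.1 then ' ' else p.2)

-- ===== PRECONDITION & SPEC =====
def Spec_getGraphic (guesses_remaining : Int) (out : String) : Prop := out = getGraphic_alt guesses_remaining
instance (guesses_remaining : Int) (out : String) : Decidable (Spec_getGraphic guesses_remaining out) := by unfold Spec_getGraphic; infer_instance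

-- ===== CLAIM (what is proved, stated in full; the proofs are below) =====
def Claim_equal_getGraphic : Prop := ∀ (guesses_remaining : Int), Dom_getGraphic guesses_remaining → Spec_getGraphic guesses_remaining (getGraphic guesses_remaining)

-- ===== LEMMAS AND PROOFS =====

-- one splice step a[:s] + ' ' + a[s+1:] is List.set at position s
lemma splice_eq_set (xs : List Char) (s : Int) (hs0 : 0 ≤ s) (hslen : s < (xs.length : Int)) :
    PySem.List.slice xs none (some s) ++ [' ']
        ++ PySem.List.slice xs (some (s + 1)) none = xs.set s.toNat ' ' := by
  rw [PySem.List.slice_to xs hs0, PySem.List.slice_from xs (show (0:Int) ≤ s + 1 by omega),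
    List.set_eq_take_append_cons_drop, if_pos (show s.toNat < xs.length by omega)]
  have h1 : (s + 1).toNat = s.toNat + 1 := by omega
  rw [h1]
  simp

-- A's splice loop over in-range positions equals one indexed pass blanking exactly those positions
lemma splice_fold (L : List Int) (xs : List Char)
    (hL : ∀ s ∈ L, 0 ≤ s ∧ s < (xs.length : Int)) :
    L.foldl (fun part stroke =>
        PySem.List.slice part none (some stroke) ++ [' ']
          ++ PySem.List.slice part (some (stroke + 1)) none) xs
      = (PySem.List.pyRange 0 (xs.length : Int) 1).map
          (fun j => if j ∈ L then ' ' else PySem.List.pyGetD xs j ' ') := by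
  induction L generalizing xs with
  | nil =>
      simp [PySem.List.map_pyGetD_pyRange_zero']
  | cons s L ih =>
      obtain ⟨hs0, hslen⟩ := hL s (List.mem_cons_self ..)
      simp only [List.foldl_cons]
      rw [splice_eq_set xs s hs0 hslen]
      rw [ih (xs.set s.toNat ' ')
        (by intro t ht; simpa using hL t (List.mem_cons_of_mem _ ht))]
      simp only [List.length_set]
      apply List.map_congr_left
      intro j hj
      rw [PySem.List.mem_pyRange_one] at hj
      by_cases hjs : j = s
      · subst hjs
        have hpg : PySem.List.pyGetD (xs.set j.toNat ' ') j ' ' = ' ' := by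
          rw [PySem.List.pyGetD_eq_getElem _ _ hj.1 (by simpa using hj.2)]
          simp
        simp [hpg]
      · have hne : s.toNat ≠ j.toNat := by omega
        have hget : PySem.List.pyGetD (xs.set s.toNat ' ') j ' '
            = PySem.List.pyGetD xs j ' ' := by
          rw [PySem.List.pyGetD_eq_getElem _ _ hj.1 (by simpa using hj.2),
            PySem.List.pyGetD_eq_getElem _ _ hj.1 hj.2]
          have hjn : j.toNat < xs.length := by omega
          exact List.getElem_set_ne hne (by simpa using hjn)
        simp [List.mem_cons, hjs, hget]

-- ===== VERDICT (by name: the statement is the Claim_ definition above) =====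
theorem getGraphic_spec : Claim_equal_getGraphic := by
  intro g _
  unfold Spec_getGraphic getGraphic getGraphic_alt
  have hall : ∀ t ∈ gaStrokes, 0 ≤ t ∧ t < (gaFull.length : Int) := by decide
  have hmem : ∀ s ∈ PySem.List.slice gaStrokes none (some g),
      0 ≤ s ∧ s < (gaFull.length : Int) := fun s hs =>
    hall s (PySem.List.mem_of_mem_slice gaStrokes none (some g) hs)
  rw [splice_fold _ _ hmem]
  simp only [PySem.List.enumerate_eq_map_pyRange gbFull ' ', List.map_map, PySem.List.len_eq]
  rw [show gbFull = gaFull from rfl, show gbStrokes = gaStrokes from rfl]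
  congr 1
  apply List.map_congr_left
  intro j hj
  simp [PySem.Set.mem_ofList]
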